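-- pv_equiv track=rewrite | github.com/alanpelayoo/coding-interview-practice | Python/codigninterviewpt2.py | estado_1
-- ===== SOURCE A (Python) =====
-- import string
--
-- def generar_lista():
-- 	our_abs = list(string.ascii_lowercase)
-- 	rangos = enumerate(our_abs)
-- 	return rangos
--
-- def estado_1(numero_1):
--
-- 	if (numero_1 ==0):
-- 		return 0,None
--
-- 	num_soluciones1 = 1
--
-- 	lista_1 = generar_lista()
--
-- 	for indix, letra in lista_1:
-- 		indice = indix+1
--
-- 		if indice == numero_1:
--
-- 			return num_soluciones1,letra
-- ===== SOURCE B (Python) =====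
-- import string
--
-- def estado_1(numero_1):
--     if numero_1 == 0:
--         return 0, None
--     if 1 <= numero_1 <= 26:
--         return 1, string.ascii_lowercase[numero_1 - 1]
--     return None
-- ===== Notes on version B (the rewrite author's own statement) =====
-- stated objective: simpler
-- what changed: Replaces the enumerate-based linear scan for the matching position with a closed-form range check and direct O(1) index into the alphabet string.
import Mathlib
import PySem

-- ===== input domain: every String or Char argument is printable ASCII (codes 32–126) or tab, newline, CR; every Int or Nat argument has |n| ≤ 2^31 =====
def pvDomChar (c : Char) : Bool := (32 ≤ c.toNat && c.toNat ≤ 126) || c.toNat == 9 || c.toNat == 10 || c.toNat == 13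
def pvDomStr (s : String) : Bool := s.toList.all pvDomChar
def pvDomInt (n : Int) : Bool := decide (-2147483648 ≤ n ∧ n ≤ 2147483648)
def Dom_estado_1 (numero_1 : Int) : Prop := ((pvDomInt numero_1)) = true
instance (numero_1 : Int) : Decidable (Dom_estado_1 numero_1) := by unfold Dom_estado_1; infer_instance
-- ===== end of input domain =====

-- B replaces A's linear scan over enumerate(alphabet) with a closed-form range check and direct index (simpler).

-- ===== PORT A =====
-- list(string.ascii_lowercase): the 26 one-character strings
def pvAbc : List String :=
  ("abcdefghijklmnopqrstuvwxyz".toList).map (fun c => String.ofList [c])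

-- the for-loop with early return: first (indix, letra) with indix+1 == numero_1
def pvLoopA : List (Int × String) → Int → Option (Int × Option String)
  | [], _ => none
  | (indix, letra) :: rest, numero_1 =>
      if indix + 1 = numero_1 then some (1, some letra) else pvLoopA rest numero_1

def estado_1 (numero_1 : Int) : Option (Int × Option String) :=
  if numero_1 = 0 then some (0, none)
  else pvLoopA (PySem.List.enumerate pvAbc) numero_1

-- ===== PORT B =====
def estado_1_alt (numero_1 : Int) : Option (Int × Option String) :=
  if numero_1 = 0 then some (0, none)
  else if 1 ≤ numero_1 ∧ numero_1 ≤ 26 then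
    some (1, (PySem.Str.pyGet? "abcdefghijklmnopqrstuvwxyz" (numero_1 - 1)).map (fun c => String.ofList [c]))
  else none

-- ===== PRECONDITION & SPEC =====
def Spec_estado_1 (numero_1 : Int) (out : Option (Int × Option String)) : Prop := out = estado_1_alt numero_1
instance (numero_1 : Int) (out : Option (Int × Option String)) : Decidable (Spec_estado_1 numero_1 out) := by unfold Spec_estado_1; infer_instance

-- ===== CLAIM (what is proved, stated in full; the proofs are below) =====
def Claim_equal_estado_1 : Prop := ∀ (numero_1 : Int), Dom_estado_1 numero_1 → Spec_estado_1 numero_1 (estado_1 numero_1)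

-- ===== LEMMAS AND PROOFS =====

theorem pvLoopA_none (l : List (Int × String)) (n : Int)
    (h : ∀ p ∈ l, p.1 + 1 ≠ n) : pvLoopA l n = none := by
  induction l with
  | nil => rfl
  | cons p rest ih =>
      obtain ⟨i, s⟩ := p
      simp only [pvLoopA]
      rw [if_neg (h (i, s) (List.mem_cons_self))]
      exact ih fun q hq => h q (List.mem_cons_of_mem _ hq)

theorem pvAgree (n : Int) : estado_1 n = estado_1_alt n := by
  by_cases h0 : n = 0
  · subst h0; decide
  · by_cases hr : 1 ≤ n ∧ n ≤ 26
    · obtain ⟨h1, h2⟩ := hr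
      interval_cases n <;> decide
    · unfold estado_1 estado_1_alt
      rw [if_neg h0, if_neg h0, if_neg hr]
      apply pvLoopA_none
      intro p hp
      rw [PySem.List.mem_enumerate_iff] at hp
      obtain ⟨k, hk, rfl⟩ := hp
      have hlen : pvAbc.length = 26 := by decide
      rw [hlen] at hk
      simp only [zero_add]
      omega

theorem estado_1_spec : Claim_equal_estado_1 := by
  intro n _
  exact pvAgree n
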